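-- pv_equiv track=rewrite | github.com/waveRider2069/sondb | Code/auth.py | verify_char
-- ===== SOURCE A (Python) =====
-- def verify_char(strings, type1):
--     if type1 == 'username':
--         if len(strings) < 8 or len(strings) > 16:
--             return False
--     elif type1 == 'password':
--         if len(strings) < 8 or len(strings) > 20:
--             return False
--     else:
--         return False
--     legal = 'abcdefghijklmnopqrstuvwxyzABCDEFGHIJKLMNOPQRSTUVWXYZ0123456789_'
--     for s in strings:
--         if s not in legal:
--             return False
--     return True
-- ===== SOURCE B (Python) =====
-- import re
--
-- _WORD = re.compile(r'[A-Za-z0-9_]*\Z')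
--
-- _MAXLEN = {'username': 16, 'password': 20}
--
-- def verify_char(strings, type1):
--     maxlen = _MAXLEN.get(type1)
--     if maxlen is None or not (8 <= len(strings) <= maxlen):
--         return False
--     return _WORD.match(strings) is not None
-- ===== Notes on version B (the rewrite author's own statement) =====
-- stated objective: idiomatic
-- what changed: Replaces the branch-per-type length checks and the explicit early-exit character loop (membership in a 63-char legal string) with a max-length table lookup plus a single ASCII regex fullmatch.
import Mathlib
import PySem

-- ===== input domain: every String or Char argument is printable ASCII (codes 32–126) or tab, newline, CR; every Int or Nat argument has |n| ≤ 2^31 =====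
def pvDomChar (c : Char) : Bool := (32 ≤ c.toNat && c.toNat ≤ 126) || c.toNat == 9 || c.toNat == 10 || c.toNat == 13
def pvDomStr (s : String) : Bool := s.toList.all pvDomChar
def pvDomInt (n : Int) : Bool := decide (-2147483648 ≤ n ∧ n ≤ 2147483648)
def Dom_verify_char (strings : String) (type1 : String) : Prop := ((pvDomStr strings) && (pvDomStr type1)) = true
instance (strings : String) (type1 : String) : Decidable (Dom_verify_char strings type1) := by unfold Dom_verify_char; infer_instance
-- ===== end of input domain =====

-- B replaces A's per-type length branches and explicit early-exit character loop with a
-- max-length table lookup plus one ASCII regex fullmatch ([A-Za-z0-9_]*); idiomatic, same cost.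

-- ===== PORT A =====
-- Loop of A: early-exit scan over the characters, membership test in the literal legal string.
def pvLegal : List Char := "abcdefghijklmnopqrstuvwxyzABCDEFGHIJKLMNOPQRSTUVWXYZ0123456789_".toList

def pvScanA : List Char → Bool
  | [] => true
  | c :: cs => if pvLegal.contains c = false then false else pvScanA cs

def verify_char (strings : String) (type1 : String) : Bool :=
  if type1 == "username" then
    if strings.toList.length < 8 || strings.toList.length > 16 then false
    else pvScanA strings.toList
  else if type1 == "password" then
    if strings.toList.length < 8 || strings.toList.length > 20 then false
    else pvScanA strings.toList
  else false

-- ===== PORT B =====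
-- B: max-length table lookup, then one regex fullmatch of [A-Za-z0-9_]* ported as an
-- all-characters check against the ASCII character class (exact for the regex on all strings).
def pvWordChar (c : Char) : Bool :=
  ('a' ≤ c && c ≤ 'z') || ('A' ≤ c && c ≤ 'Z') || ('0' ≤ c && c ≤ '9') || c == '_'

def pvMaxLen : PySem.Dict String Int :=
  (PySem.Dict.empty.insert "username" 16).insert "password" 20

def verify_char_alt (strings : String) (type1 : String) : Bool :=
  match pvMaxLen.get? type1 with
  | none => false
  | some maxlen =>
    if 8 ≤ (strings.toList.length : Int) && (strings.toList.length : Int) ≤ maxlen then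
      strings.toList.all pvWordChar
    else false

-- ===== PRECONDITION & SPEC =====
def Spec_verify_char (strings : String) (type1 : String) (out : Bool) : Prop := out = verify_char_alt strings type1
instance (strings : String) (type1 : String) (out : Bool) : Decidable (Spec_verify_char strings type1 out) := by unfold Spec_verify_char; infer_instance

-- ===== CLAIM (what is proved, stated in full; the proofs are below) =====
def Claim_equal_verify_char : Prop := ∀ (strings : String) (type1 : String), Dom_verify_char strings type1 → Spec_verify_char strings type1 (verify_char strings type1)

-- ===== LEMMAS AND PROOFS =====

lemma pvWordChar_eq_contains (c : Char) : pvLegal.contains c = pvWordChar c := by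
  have hL : pvLegal = ['a', 'b', 'c', 'd', 'e', 'f', 'g', 'h', 'i', 'j', 'k', 'l', 'm', 'n', 'o', 'p', 'q', 'r', 's', 't', 'u', 'v', 'w', 'x', 'y', 'z', 'A', 'B', 'C', 'D', 'E', 'F', 'G', 'H', 'I', 'J', 'K', 'L', 'M', 'N', 'O', 'P', 'Q', 'R', 'S', 'T', 'U', 'V', 'W', 'X', 'Y', 'Z', '0', '1', '2', '3', '4', '5', '6', '7', '8', '9', '_'] := by decide
  rw [Bool.eq_iff_iff, hL]
  simp only [pvWordChar, List.contains_cons, List.contains_nil, Bool.or_false, Bool.or_eq_true,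
    beq_iff_eq, Char.ext_iff, Char.le_def, UInt32.le_iff_toNat_le, UInt32.ext_iff,
    Bool.and_eq_true, decide_eq_true_eq,
    show 'a'.val.toNat = 97 from rfl,
    show 'b'.val.toNat = 98 from rfl,
    show 'c'.val.toNat = 99 from rfl,
    show 'd'.val.toNat = 100 from rfl,
    show 'e'.val.toNat = 101 from rfl,
    show 'f'.val.toNat = 102 from rfl,
    show 'g'.val.toNat = 103 from rfl,
    show 'h'.val.toNat = 104 from rfl,
    show 'i'.val.toNat = 105 from rfl,
    show 'j'.val.toNat = 106 from rfl,
    show 'k'.val.toNat = 107 from rfl,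
    show 'l'.val.toNat = 108 from rfl,
    show 'm'.val.toNat = 109 from rfl,
    show 'n'.val.toNat = 110 from rfl,
    show 'o'.val.toNat = 111 from rfl,
    show 'p'.val.toNat = 112 from rfl,
    show 'q'.val.toNat = 113 from rfl,
    show 'r'.val.toNat = 114 from rfl,
    show 's'.val.toNat = 115 from rfl,
    show 't'.val.toNat = 116 from rfl,
    show 'u'.val.toNat = 117 from rfl,
    show 'v'.val.toNat = 118 from rfl,
    show 'w'.val.toNat = 119 from rfl,
    show 'x'.val.toNat = 120 from rfl,
    show 'y'.val.toNat = 121 from rfl,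
    show 'z'.val.toNat = 122 from rfl,
    show 'A'.val.toNat = 65 from rfl,
    show 'B'.val.toNat = 66 from rfl,
    show 'C'.val.toNat = 67 from rfl,
    show 'D'.val.toNat = 68 from rfl,
    show 'E'.val.toNat = 69 from rfl,
    show 'F'.val.toNat = 70 from rfl,
    show 'G'.val.toNat = 71 from rfl,
    show 'H'.val.toNat = 72 from rfl,
    show 'I'.val.toNat = 73 from rfl,
    show 'J'.val.toNat = 74 from rfl,
    show 'K'.val.toNat = 75 from rfl,
    show 'L'.val.toNat = 76 from rfl,
    show 'M'.val.toNat = 77 from rfl,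
    show 'N'.val.toNat = 78 from rfl,
    show 'O'.val.toNat = 79 from rfl,
    show 'P'.val.toNat = 80 from rfl,
    show 'Q'.val.toNat = 81 from rfl,
    show 'R'.val.toNat = 82 from rfl,
    show 'S'.val.toNat = 83 from rfl,
    show 'T'.val.toNat = 84 from rfl,
    show 'U'.val.toNat = 85 from rfl,
    show 'V'.val.toNat = 86 from rfl,
    show 'W'.val.toNat = 87 from rfl,
    show 'X'.val.toNat = 88 from rfl,
    show 'Y'.val.toNat = 89 from rfl,
    show 'Z'.val.toNat = 90 from rfl,
    show '0'.val.toNat = 48 from rfl,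
    show '1'.val.toNat = 49 from rfl,
    show '2'.val.toNat = 50 from rfl,
    show '3'.val.toNat = 51 from rfl,
    show '4'.val.toNat = 52 from rfl,
    show '5'.val.toNat = 53 from rfl,
    show '6'.val.toNat = 54 from rfl,
    show '7'.val.toNat = 55 from rfl,
    show '8'.val.toNat = 56 from rfl,
    show '9'.val.toNat = 57 from rfl,
    show '_'.val.toNat = 95 from rfl]
  omega

lemma pvScanA_eq_all (cs : List Char) : pvScanA cs = cs.all pvWordChar := by
  induction cs with
  | nil => rfl
  | cons c cs ih =>
    simp only [pvScanA, List.all_cons, ← pvWordChar_eq_contains c]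
    cases h : pvLegal.contains c <;> simp [ih]

lemma pvGate (n mN : Nat) (m : Int) (hm : m = mN) (x : Bool) :
    (if (decide (n < 8) || decide (n > mN)) = true then false else x)
      = (if (8 ≤ (n : Int) && (n : Int) ≤ m) = true then x else false) := by
  subst hm
  split_ifs with h1 h2 <;> simp_all <;> omega

-- ===== VERDICT (by name: the statement is the Claim_ definition above) =====
theorem verify_char_spec : Claim_equal_verify_char := by
  intro strings type1 _
  unfold Spec_verify_char verify_char verify_char_alt
  by_cases hu : type1 = "username"
  · subst hu
    simp only [beq_self_eq_true, if_true, pvMaxLen, PySem.Dict.get?, PySem.Dict.insert,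
      PySem.Dict.empty, pvScanA_eq_all]
    exact pvGate strings.toList.length 16 16 (by norm_num) _
  · by_cases hp : type1 = "password"
    · subst hp
      simp only [beq_iff_eq, if_false, if_true, pvMaxLen, PySem.Dict.get?, PySem.Dict.insert,
        PySem.Dict.empty, pvScanA_eq_all, String.reduceEq]
      exact pvGate strings.toList.length 20 20 (by norm_num) _
    · have h1 : ("username" == type1) = false := beq_eq_false_iff_ne.mpr (Ne.symm hu)
      have h2 : ("password" == type1) = false := beq_eq_false_iff_ne.mpr (Ne.symm hp)
      have h3 : (type1 == "username") = false := beq_eq_false_iff_ne.mpr hu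
      have h4 : (type1 == "password") = false := beq_eq_false_iff_ne.mpr hp
      simp [pvMaxLen, PySem.Dict.get?, PySem.Dict.insert, PySem.Dict.empty, List.find?,
        h1, h2, h3, h4]
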